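-- pv_equiv track=rewrite | github.com/mrphys/Open-Source_Pre-Clinical_Segmentation | utility.py | _pick_metric_key
-- ===== SOURCE A (Python) =====
-- def _pick_metric_key(hist: dict, suffix: str,
--                      prefer_substrings=("deepsup_activation_1_", "deepsup_conv_1_2_", "Decoder1", "decoder1", "")):
--     """
--     Pick a train-metric key that ends with `suffix` (e.g., 'dice_myo'),
--     preferring names that usually correspond to the final deep-supervision head.
--     Returns None if not found.
--     """
--     cands = [k for k in hist.keys() if not k.startswith("val_") and k.endswith(suffix)]
--     for pref in prefer_substrings:
--         for k in cands:
--             if pref in k: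
--                 return k
--     return cands[0] if cands else None
-- ===== SOURCE B (Python) =====
-- def _pick_metric_key(hist: dict, suffix: str,
--                      prefer_substrings=("deepsup_activation_1_", "deepsup_conv_1_2_", "Decoder1", "decoder1", "")):
--     """Pick a train-metric key ending with `suffix`, preferring names by
--     `prefer_substrings` order: single pass via a rank-keyed stable min."""
--     cands = [k for k in hist.keys() if not k.startswith("val_") and k.endswith(suffix)]
--     if not cands:
--         return None
--
--     def rank(k):
--         for i, p in enumerate(prefer_substrings):
--             if p in k:
--                 return i
--         return len(prefer_substrings)
--
--     return min(cands, key=rank)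
-- ===== Notes on version B (the rewrite author's own statement) =====
-- stated objective: alternative
-- what changed: Replaced the preference-outer/candidate-inner nested scan with a single stable min over the candidates keyed by a rank function (index of the first matching preferred substring, list length if none), which also subsumes the cands[0] fallback.
import Mathlib
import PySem

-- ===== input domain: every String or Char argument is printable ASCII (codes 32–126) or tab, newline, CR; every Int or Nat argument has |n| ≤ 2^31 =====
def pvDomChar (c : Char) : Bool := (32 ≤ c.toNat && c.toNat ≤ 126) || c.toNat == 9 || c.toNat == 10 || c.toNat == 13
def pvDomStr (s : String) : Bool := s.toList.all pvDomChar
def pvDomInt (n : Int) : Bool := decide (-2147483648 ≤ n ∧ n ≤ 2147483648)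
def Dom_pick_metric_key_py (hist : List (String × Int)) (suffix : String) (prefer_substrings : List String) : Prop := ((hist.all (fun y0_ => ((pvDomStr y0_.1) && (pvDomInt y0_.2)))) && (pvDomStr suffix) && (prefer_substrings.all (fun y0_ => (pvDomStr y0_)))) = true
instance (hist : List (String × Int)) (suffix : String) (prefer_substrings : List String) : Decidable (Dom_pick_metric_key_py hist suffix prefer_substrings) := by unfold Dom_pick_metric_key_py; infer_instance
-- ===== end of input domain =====

-- B replaces A's preference-outer/candidate-inner nested scan by a single stable
-- min over candidates keyed by a preference rank (objective: alternative decomposition).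


-- ===== PORT A =====
-- inner loop: 'for k in cands: if pref in k: return k'
def pvAInner (pref : String) : List String → Option String
  | [] => none
  | k :: rest => if PySem.Str.isIn pref k then some k else pvAInner pref rest

-- outer loop: 'for pref in prefer_substrings: …'
def pvALoop (cands : List String) : List String → Option String
  | [] => none
  | pref :: rest =>
    match pvAInner pref cands with
    | some k => some k
    | none => pvALoop cands rest

def pick_metric_key_py (hist : List (String × Int)) (suffix : String) (prefer_substrings : List String) : Option String :=
  let cands := ((PySem.Dict.ofList hist).keys).filter
    (fun k => !(PySem.Str.startswith k "val_") && PySem.Str.endswith k suffix)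
  match pvALoop cands prefer_substrings with
  | some k => some k
  | none => cands.head?

-- ===== PORT B =====
-- rank(k): index of the first preferred substring contained in k, else the list length
def pvRank (k : String) : List String → Nat
  | [] => 0
  | p :: rest => if PySem.Str.isIn p k then 0 else 1 + pvRank k rest

def pick_metric_key_py_alt (hist : List (String × Int)) (suffix : String) (prefer_substrings : List String) : Option String :=
  let cands := ((PySem.Dict.ofList hist).keys).filter
    (fun k => !(PySem.Str.startswith k "val_") && PySem.Str.endswith k suffix)
  match cands with
  | [] => none
  | _ :: _ => PySem.List.min? cands (fun k => pvRank k prefer_substrings)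

-- ===== PRECONDITION & SPEC =====
def Spec_pick_metric_key_py (hist : List (String × Int)) (suffix : String) (prefer_substrings : List String) (out : Option String) : Prop := out = pick_metric_key_py_alt hist suffix prefer_substrings
instance (hist : List (String × Int)) (suffix : String) (prefer_substrings : List String) (out : Option String) : Decidable (Spec_pick_metric_key_py hist suffix prefer_substrings out) := by unfold Spec_pick_metric_key_py; infer_instance

-- ===== CLAIM (what is proved, stated in full; the proofs are below) =====
def Claim_equal_pick_metric_key_py : Prop := ∀ (hist : List (String × Int)) (suffix : String) (prefer_substrings : List String), Dom_pick_metric_key_py hist suffix prefer_substrings → Spec_pick_metric_key_py hist suffix prefer_substrings (pick_metric_key_py hist suffix prefer_substrings)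

-- ===== LEMMAS AND PROOFS =====

-- the plain (non-Option) accumulator step of Python's stable min with key pvRank
def pvStep (ps : List String) (m x : String) : String :=
  if pvRank x ps < pvRank m ps then x else m

theorem pvALoop_nil (ps : List String) : pvALoop [] ps = none := by
  induction ps with
  | nil => rfl
  | cons p ps ih => simpa [pvALoop, pvAInner] using ih

theorem pvAInner_none (p : String) (l : List String) (h : pvAInner p l = none) :
    ∀ k ∈ l, PySem.Chars.isIn p.toList k.toList = false := by
  induction l with
  | nil => simp
  | cons x t ih =>
    by_cases hx : PySem.Chars.isIn p.toList x.toList = true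
    · simp [pvAInner, PySem.Str.isIn, hx] at h
    · intro k hk
      rcases List.mem_cons.mp hk with hk | hk
      · subst hk; simpa using hx
      · exact ih (by simpa [pvAInner, PySem.Str.isIn, hx] using h) k hk

theorem pvAInner_some (p : String) (l : List String) (k : String)
    (h : pvAInner p l = some k) : k ∈ l ∧ PySem.Chars.isIn p.toList k.toList = true := by
  induction l with
  | nil => simp [pvAInner] at h
  | cons x t ih =>
    by_cases hx : PySem.Chars.isIn p.toList x.toList = true
    · simp [pvAInner, PySem.Str.isIn, hx] at h
      subst h
      exact ⟨by simp, hx⟩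
    · have h' : pvAInner p t = some k := by simpa [pvAInner, PySem.Str.isIn, hx] using h
      exact ⟨List.mem_cons_of_mem _ (ih h').1, (ih h').2⟩

theorem pvALoop_some_mem (l ps : List String) (m : String)
    (h : pvALoop l ps = some m) : m ∈ l := by
  induction ps with
  | nil => simp [pvALoop] at h
  | cons p ps ih =>
    cases hq : pvAInner p l with
    | some k =>
      have := pvAInner_some p l k hq
      simp [pvALoop, hq] at h
      exact h ▸ this.1
    | none => exact ih (by simpa [pvALoop, hq] using h)

theorem pvRank_le (k : String) (ps : List String) : pvRank k ps ≤ ps.length := by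
  induction ps with
  | nil => simp [pvRank]
  | cons p ps ih =>
    by_cases hp : PySem.Chars.isIn p.toList k.toList = true <;>
      simp [pvRank, PySem.Str.isIn, hp] <;> omega

theorem pvALoop_none_rank (l : List String) (ps : List String)
    (h : pvALoop l ps = none) : ∀ k ∈ l, pvRank k ps = ps.length := by
  induction ps with
  | nil => intro k _; rfl
  | cons p ps ih =>
    cases hinner : pvAInner p l with
    | some m => simp [pvALoop, hinner] at h
    | none =>
      have h' : pvALoop l ps = none := by simpa [pvALoop, hinner] using h
      intro k hk
      have hni := pvAInner_none p l hinner k hk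
      simp [pvRank, PySem.Str.isIn, hni, ih h' k hk]
      omega

theorem pvALoop_cons (c : String) (l : List String) (ps : List String) :
    pvALoop (c :: l) ps =
      match pvALoop l ps with
      | none => if pvRank c ps < ps.length then some c else none
      | some m => some (if pvRank m ps < pvRank c ps then m else c) := by
  induction ps with
  | nil => simp [pvALoop]
  | cons p ps ih =>
    by_cases hc : PySem.Chars.isIn p.toList c.toList = true
    · have h0 : pvRank c (p :: ps) = 0 := by simp [pvRank, PySem.Str.isIn, hc]
      cases hl : pvALoop l (p :: ps) with
      | some m => simp [pvALoop, pvAInner, PySem.Str.isIn, hc, h0]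
      | none => simp [pvALoop, pvAInner, PySem.Str.isIn, hc, h0]
    · have hcr : pvRank c (p :: ps) = 1 + pvRank c ps := by
        simp [pvRank, PySem.Str.isIn, hc]
      cases hinner : pvAInner p l with
      | some k =>
        have hk := pvAInner_some p l k hinner
        have hk0 : pvRank k (p :: ps) = 0 := by simp [pvRank, PySem.Str.isIn, hk.2]
        simp [pvALoop, pvAInner, PySem.Str.isIn, hc, hinner, hk0, hcr]
      | none =>
        have hstep : pvALoop (c :: l) (p :: ps) = pvALoop (c :: l) ps := by
          simp [pvALoop, pvAInner, PySem.Str.isIn, hc, hinner]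
        have hlstep : pvALoop l (p :: ps) = pvALoop l ps := by
          simp [pvALoop, hinner]
        rw [hstep, hlstep, ih]
        cases hl : pvALoop l ps with
        | none =>
          simp only [hcr, List.length_cons]
          split_ifs with h1 h2 <;> first | rfl | omega
        | some m =>
          have hm : m ∈ l := pvALoop_some_mem l ps m hl
          have hmr : pvRank m (p :: ps) = 1 + pvRank m ps := by
            simp [pvRank, PySem.Str.isIn, pvAInner_none p l hinner m hm]
          simp only [hmr, hcr]
          split_ifs with h1 h2 <;> first | rfl | omega

theorem pvMin?_cons {κ : Type} [LT κ] [DecidableLT κ] (key : String → κ) (c : String) (l : List String) :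
    PySem.List.min? (c :: l) key
      = some (List.foldl (fun m x => if key x < key m then x else m) c l) := by
  induction l generalizing c with
  | nil => rfl
  | cons x t ih =>
    have h1 : PySem.List.min? (c :: x :: t) key
        = PySem.List.min? ((if key x < key c then x else c) :: t) key := by
      by_cases h : key x < key c <;> simp [PySem.List.min?, List.foldl, h]
    rw [h1, ih]
    rfl

theorem pvFold_id (ps : List String) (l : List String) (c : String)
    (h : ∀ x ∈ l, ¬ pvRank x ps < pvRank c ps) :
    l.foldl (pvStep ps) c = c := by
  induction l with
  | nil => rfl
  | cons x t ih =>
    have hx : pvStep ps c x = c := by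
      simp [pvStep, h x (by simp)]
    simp only [List.foldl, hx]
    exact ih (fun y hy => h y (by simp [hy]))

theorem pvFold_cons (ps : List String) (l : List String) (c : String) :
    l.foldl (pvStep ps) c =
      match l with
      | [] => c
      | x :: t =>
        if pvRank (t.foldl (pvStep ps) x) ps < pvRank c ps then t.foldl (pvStep ps) x else c := by
  induction l generalizing c with
  | nil => rfl
  | cons x t ih =>
    cases t with
    | nil =>
      simp [List.foldl, pvStep]
    | cons y t' =>
      have ihx := ih (c := pvStep ps c x)
      have ihy := ih (c := x)
      simp only [List.foldl] at *
      rw [ihx, ihy]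
      simp only [pvStep]
      split_ifs <;> first | rfl | omega

theorem pvMain (ps cands : List String) :
    (match pvALoop cands ps with
     | some k => some k
     | none => cands.head?) =
    (match cands with
     | [] => none
     | _ :: _ => PySem.List.min? cands (fun k => pvRank k ps)) := by
  induction cands with
  | nil => simp [pvALoop_nil]
  | cons c l ih =>
    rw [pvMin?_cons]
    have hfold : (fun (m x : String) => if pvRank x ps < pvRank m ps then x else m) = pvStep ps := by
      funext m x; rfl
    rw [hfold, pvALoop_cons]
    cases hl : pvALoop l ps with
    | some m =>
      rw [hl] at ih
      cases cands' : l with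
      | nil => simp [cands'] at ih
      | cons x t =>
        rw [cands'] at ih
        rw [pvMin?_cons, hfold] at ih
        have hm : t.foldl (pvStep ps) x = m := by
          simpa using ih.symm
        rw [pvFold_cons ps (x :: t) c]
        simp only [hm]
    | none =>
      have hall : ∀ x ∈ l, ¬ pvRank x ps < pvRank c ps := by
        intro x hx
        have h1 := pvALoop_none_rank l ps hl x hx
        have h2 := pvRank_le c ps
        omega
      rw [pvFold_id ps l c hall]
      split_ifs <;> rfl

-- ===== VERDICT (by name: the statement is the Claim_ definition above) =====
theorem pick_metric_key_py_spec : Claim_equal_pick_metric_key_py := by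
  intro hist suffix prefs _
  unfold Spec_pick_metric_key_py pick_metric_key_py pick_metric_key_py_alt
  exact pvMain prefs _
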